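-- pv_equiv track=rewrite | github.com/tuananhfr/ParkAI | backend-edge1/plate_tracker.py | _find_formatted_version
-- ===== SOURCE A (Python) =====
-- def _find_formatted_version(base_plate, votes):
--     """
--     Tìm version có dấu - hoặc . (cùng số + chữ với base_plate)
--
--     Ưu tiên:
--     1. Có cả - và .
--     2. Chỉ có -
--     3. Chỉ có .
--
--     Returns:
--         plate_text hoặc None
--     """
--     # Normalize base
--     base_normalized = ''.join(c.upper() for c in base_plate if c.isalnum())
--
--     # Tim cac version co dau
--     with_both = []      # Co ca - va .
--     with_dash = []      # Chi co -
--     with_dot = []       # Chi co .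
--
--     for vote in votes:
--         vote_normalized = ''.join(c.upper() for c in vote if c.isalnum())
--
--         # Cung so + chu?
--         if vote_normalized == base_normalized:
--             has_dash = '-' in vote
--             has_dot = '.' in vote
--
--             if has_dash and has_dot:
--                 with_both.append(vote)
--             elif has_dash:
--                 with_dash.append(vote)
--             elif has_dot:
--                 with_dot.append(vote)
--
--     # Uu tien: co ca 2 > chi dash > chi dot
--     if with_both:
--         return with_both[0]
--     elif with_dash:
--         return with_dash[0]
--     elif with_dot:
--         return with_dot[0]
--
--     return None
-- ===== SOURCE B (Python) =====
-- def _find_formatted_version(base_plate, votes):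
--     base_normalized = ''.join(c.upper() for c in base_plate if c.isalnum())
--
--     def scan(pred):
--         return next((v for v in votes
--                      if ''.join(c.upper() for c in v if c.isalnum()) == base_normalized
--                      and pred(v)), None)
--
--     result = scan(lambda v: '-' in v and '.' in v)
--     if result is None:
--         result = scan(lambda v: '-' in v and '.' not in v)
--     if result is None:
--         result = scan(lambda v: '.' in v and '-' not in v)
--     return result
-- ===== Notes on version B (the rewrite author's own statement) =====
-- stated objective: simpler
-- what changed: Replaces the single pass that accumulates three priority lists with three independent first-match scans (next() over a generator) in priority order, keeping no accumulators.
import Mathlib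
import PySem

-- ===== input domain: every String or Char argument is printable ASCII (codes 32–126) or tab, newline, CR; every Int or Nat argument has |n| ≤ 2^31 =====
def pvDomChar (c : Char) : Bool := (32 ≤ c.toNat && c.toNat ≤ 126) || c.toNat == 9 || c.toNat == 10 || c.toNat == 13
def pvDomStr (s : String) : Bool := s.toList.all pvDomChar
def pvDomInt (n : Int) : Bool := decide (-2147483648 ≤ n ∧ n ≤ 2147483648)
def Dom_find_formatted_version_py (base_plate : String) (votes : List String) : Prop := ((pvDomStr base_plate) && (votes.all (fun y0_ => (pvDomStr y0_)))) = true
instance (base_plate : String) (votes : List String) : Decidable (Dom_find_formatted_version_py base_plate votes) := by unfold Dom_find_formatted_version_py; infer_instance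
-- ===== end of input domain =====

-- B replaces A's single pass accumulating three priority lists by three independent
-- first-match scans in priority order (simpler: no accumulators). Return value only; no mutation.

-- ''.join(c.upper() for c in s if c.isalnum())  (shared by both Pythons verbatim)
def pvNorm (s : String) : String :=
  String.ofList ((s.toList.filter PySem.Chars.isalnum).map PySem.Chars.upperChar)

-- ===== PORT A =====
-- the loop body of A's single pass (one iteration of `for vote in votes`)
def pvStepA (base_normalized : String) (acc : List String × List String × List String)
    (vote : String) : List String × List String × List String :=
  let vote_normalized := pvNorm vote
  if vote_normalized == base_normalized then
    let has_dash := vote.toList.contains '-'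
    let has_dot := vote.toList.contains '.'
    if has_dash && has_dot then (acc.1 ++ [vote], acc.2.1, acc.2.2)
    else if has_dash then (acc.1, acc.2.1 ++ [vote], acc.2.2)
    else if has_dot then (acc.1, acc.2.1, acc.2.2 ++ [vote])
    else acc
  else acc

def find_formatted_version_py (base_plate : String) (votes : List String) : Option String :=
  let base_normalized := pvNorm base_plate
  let st := votes.foldl (pvStepA base_normalized) ([], [], [])
  match st.1.head? with
  | some v => some v
  | none =>
    match st.2.1.head? with
    | some v => some v
    | none => st.2.2.head?

-- ===== PORT B =====
-- next((v for v in votes if norm(v) == base_normalized and pred(v)), None)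
def pvScan (base_normalized : String) (votes : List String) (pred : String → Bool) : Option String :=
  votes.find? (fun v => pvNorm v == base_normalized && pred v)

def find_formatted_version_py_alt (base_plate : String) (votes : List String) : Option String :=
  let base_normalized := pvNorm base_plate
  let r := pvScan base_normalized votes
      (fun v => v.toList.contains '-' && v.toList.contains '.')
  let r := match r with
    | some x => some x
    | none => pvScan base_normalized votes
        (fun v => v.toList.contains '-' && !v.toList.contains '.')
  match r with
  | some x => some x
  | none => pvScan base_normalized votes
      (fun v => v.toList.contains '.' && !v.toList.contains '-')

-- ===== PRECONDITION & SPEC =====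
def Spec_find_formatted_version_py (base_plate : String) (votes : List String) (out : Option String) : Prop := out = find_formatted_version_py_alt base_plate votes
instance (base_plate : String) (votes : List String) (out : Option String) : Decidable (Spec_find_formatted_version_py base_plate votes out) := by unfold Spec_find_formatted_version_py; infer_instance

-- ===== CLAIM (what is proved, stated in full; the proofs are below) =====
def Claim_equal_find_formatted_version_py : Prop := ∀ (base_plate : String) (votes : List String), Dom_find_formatted_version_py base_plate votes → Spec_find_formatted_version_py base_plate votes (find_formatted_version_py base_plate votes)

-- ===== LEMMAS AND PROOFS =====

-- first element of a filtered list = first match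
theorem head?_filter_eq_find? {α : Type} (p q : α → Bool) (h : ∀ x, p x = q x)
    (l : List α) : (l.filter p).head? = l.find? q := by
  induction l with
  | nil => rfl
  | cons a t ih =>
    simp only [List.filter_cons, List.find?_cons, ← h a]
    cases hp : p a <;> simp [ih]

-- A's accumulator fold is three filters
theorem foldA_eq_filters (nb : String) (votes : List String)
    (b d t : List String) :
    votes.foldl (pvStepA nb) (b, d, t)
    = (b ++ votes.filter (fun v => pvNorm v == nb && (v.toList.contains '-' && v.toList.contains '.')),
       d ++ votes.filter (fun v => pvNorm v == nb && (v.toList.contains '-' && !v.toList.contains '.')),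
       t ++ votes.filter (fun v => pvNorm v == nb && (!v.toList.contains '-' && v.toList.contains '.'))) := by
  induction votes generalizing b d t with
  | nil => simp
  | cons v vs ih =>
    rw [List.foldl_cons]
    cases hn : (pvNorm v == nb) with
    | false =>
      rw [show pvStepA nb (b, d, t) v = (b, d, t) from by simp [pvStepA, hn], ih]
      simp [hn]
    | true =>
      by_cases hd : '-' ∈ v.toList
      · by_cases ho : '.' ∈ v.toList
        · rw [show pvStepA nb (b, d, t) v = (b ++ [v], d, t) from by
            simp [pvStepA, hn, hd, ho], ih]
          simp [hn, hd, ho]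
        · rw [show pvStepA nb (b, d, t) v = (b, d ++ [v], t) from by
            simp [pvStepA, hn, hd, ho], ih]
          simp [hn, hd, ho]
      · by_cases ho : '.' ∈ v.toList
        · rw [show pvStepA nb (b, d, t) v = (b, d, t ++ [v]) from by
            simp [pvStepA, hn, hd, ho], ih]
          simp [hn, hd, ho]
        · rw [show pvStepA nb (b, d, t) v = (b, d, t) from by
            simp [pvStepA, hn, hd, ho], ih]
          simp [hn, hd, ho]

-- ===== VERDICT (by name: the statement is the Claim_ definition above) =====
theorem find_formatted_version_py_spec : Claim_equal_find_formatted_version_py := by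
  intro base_plate votes _
  unfold Spec_find_formatted_version_py
  unfold find_formatted_version_py find_formatted_version_py_alt pvScan
  simp only [foldA_eq_filters, List.nil_append]
  rw [head?_filter_eq_find? _ (fun v => pvNorm v == pvNorm base_plate && (v.toList.contains '-' && v.toList.contains '.')) (fun _ => rfl),
      head?_filter_eq_find? _ (fun v => pvNorm v == pvNorm base_plate && (v.toList.contains '-' && !v.toList.contains '.')) (fun _ => rfl),
      head?_filter_eq_find? _ (fun v => pvNorm v == pvNorm base_plate && (v.toList.contains '.' && !v.toList.contains '-'))
        (by intro x; simp [Bool.and_comm])]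
  cases votes.find? (fun v => pvNorm v == pvNorm base_plate && (v.toList.contains '-' && v.toList.contains '.')) <;>
    cases votes.find? (fun v => pvNorm v == pvNorm base_plate && (v.toList.contains '-' && !v.toList.contains '.')) <;>
    rfl
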